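-- pv_equiv track=rewrite | github.com/MacKenzieOBrian/NLtoSQL | nl2sql/constraint_hints.py | _explicit_field_list
-- ===== SOURCE A (Python) =====
-- _FIELD_SYNONYMS = {
--     "msrp": "MSRP",
--     "msrps": "MSRP",
--     "product code": "productCode",
--     "product codes": "productCode",
--     "product name": "productName",
--     "product names": "productName",
--     "product line": "productLine",
--     "order number": "orderNumber",
--     "order date": "orderDate",
--     "order dates": "orderDate",
--     "customer name": "customerName",
--     "customer number": "customerNumber",
--     "credit limit": "creditLimit",
--     "phone": "phone",
--     "city": "city",
--     "country": "country",
--     "state": "state",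
--     "postal code": "postalCode",
--     "zip": "postalCode",
--     "payment date": "paymentDate",
--     "payment dates": "paymentDate",
--     "check number": "checkNumber",
--     "check numbers": "checkNumber",
--     "office code": "officeCode",
--     "employee number": "employeeNumber",
--     "first name": "firstName",
--     "last name": "lastName",
--     "status": "status",
--     "comments": "comments",
--     "amount": "amount",
-- }
--
-- _SPECIAL_FIELD_HINTS = {
--     "codes": ("productCode", ["product"]),
-- }
--
-- def _explicit_field_list(nlq: str) -> list[str]:
--     """Extract explicit output fields in NLQ order when fields are enumerated."""
--     nl = (nlq or "").lower()
--     if not ("," in nl or " and " in nl or nl.startswith(("show", "list", "give", "display"))):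
--         return []
--
--     hits: list[tuple[int, str]] = []
--     for k, col in _FIELD_SYNONYMS.items():
--         idx = nl.find(k)
--         if idx != -1:
--             hits.append((idx, col))
--     for k, (col, ctx) in _SPECIAL_FIELD_HINTS.items():
--         idx = nl.find(k)
--         if idx != -1 and any(c in nl for c in ctx):
--             hits.append((idx, col))
--     if not hits:
--         return []
--     hits.sort(key=lambda x: x[0])
--     ordered: list[str] = []
--     for _, col in hits:
--         if col not in ordered:
--             ordered.append(col)
--     return ordered
-- ===== SOURCE B (Python) =====
-- _FIELD_SYNONYMS = {
--     "msrp": "MSRP",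
--     "msrps": "MSRP",
--     "product code": "productCode",
--     "product codes": "productCode",
--     "product name": "productName",
--     "product names": "productName",
--     "product line": "productLine",
--     "order number": "orderNumber",
--     "order date": "orderDate",
--     "order dates": "orderDate",
--     "customer name": "customerName",
--     "customer number": "customerNumber",
--     "credit limit": "creditLimit",
--     "phone": "phone",
--     "city": "city",
--     "country": "country",
--     "state": "state",
--     "postal code": "postalCode",
--     "zip": "postalCode",
--     "payment date": "paymentDate",
--     "payment dates": "paymentDate",
--     "check number": "checkNumber",
--     "check numbers": "checkNumber",
--     "office code": "officeCode",
--     "employee number": "employeeNumber",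
--     "first name": "firstName",
--     "last name": "lastName",
--     "status": "status",
--     "comments": "comments",
--     "amount": "amount",
-- }
--
-- _SPECIAL_FIELD_HINTS = {
--     "codes": ("productCode", ["product"]),
-- }
--
--
-- def _explicit_field_list(nlq: str) -> list[str]:
--     """Extract explicit output fields in NLQ order when fields are enumerated.
--
--     Single left-to-right scan: at each text position, any synonym phrase that
--     starts there contributes its column (first appearance wins), so the result
--     comes out in encounter order with no per-key find, no sort and no dedup pass.
--     """
--     nl = (nlq or "").lower()
--     if not ("," in nl or " and " in nl or nl.startswith(("show", "list", "give", "display"))):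
--         return []
--
--     ordered: list[str] = []
--     for i in range(len(nl)):
--         for k, col in _FIELD_SYNONYMS.items():
--             if nl.startswith(k, i) and col not in ordered:
--                 ordered.append(col)
--         for k, (col, ctx) in _SPECIAL_FIELD_HINTS.items():
--             if nl.startswith(k, i) and any(c in nl for c in ctx) and col not in ordered:
--                 ordered.append(col)
--     return ordered
-- ===== Notes on version B (the rewrite author's own statement) =====
-- stated objective: alternative
-- what changed: B replaces A's per-key find() pass plus sort-by-index plus dedup pass by a single left-to-right scan of the text that appends each column the first time one of its synonym phrases starts at the current position, so the output is built directly in encounter order with no sort and no separate dedup.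
import Mathlib
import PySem

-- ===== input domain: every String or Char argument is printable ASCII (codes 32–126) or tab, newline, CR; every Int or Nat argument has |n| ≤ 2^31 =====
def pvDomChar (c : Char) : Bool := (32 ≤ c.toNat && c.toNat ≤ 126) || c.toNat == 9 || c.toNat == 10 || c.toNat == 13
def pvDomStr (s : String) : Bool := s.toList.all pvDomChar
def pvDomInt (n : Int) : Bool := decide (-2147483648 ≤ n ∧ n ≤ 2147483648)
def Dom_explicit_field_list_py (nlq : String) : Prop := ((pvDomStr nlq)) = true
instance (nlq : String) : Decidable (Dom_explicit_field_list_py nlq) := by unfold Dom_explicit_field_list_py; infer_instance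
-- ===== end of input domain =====

-- B replaces A's per-key find + sort-by-index + dedup pass by a single left-to-right
-- scan of the text that appends each column at its first matching position (alternative
-- decomposition, same cost class; return values proved identical).

-- ===== PORT A =====
def pvFieldSynonyms : List (String × String) :=
  [("msrp", "MSRP"), ("msrps", "MSRP"),
   ("product code", "productCode"), ("product codes", "productCode"),
   ("product name", "productName"), ("product names", "productName"),
   ("product line", "productLine"), ("order number", "orderNumber"),
   ("order date", "orderDate"), ("order dates", "orderDate"),
   ("customer name", "customerName"), ("customer number", "customerNumber"),
   ("credit limit", "creditLimit"), ("phone", "phone"), ("city", "city"),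
   ("country", "country"), ("state", "state"), ("postal code", "postalCode"),
   ("zip", "postalCode"), ("payment date", "paymentDate"),
   ("payment dates", "paymentDate"), ("check number", "checkNumber"),
   ("check numbers", "checkNumber"), ("office code", "officeCode"),
   ("employee number", "employeeNumber"), ("first name", "firstName"),
   ("last name", "lastName"), ("status", "status"), ("comments", "comments"),
   ("amount", "amount")]

def pvSpecialHints : List (String × (String × List String)) :=
  [("codes", ("productCode", ["product"]))]

-- the leading guard, shared verbatim by both Pythons:
-- "," in nl or " and " in nl or nl.startswith(("show", "list", "give", "display"))
def pvGuard (nl : String) : Bool :=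
  PySem.Str.isIn "," nl || PySem.Str.isIn " and " nl ||
  (PySem.Str.startswith nl "show" || PySem.Str.startswith nl "list" ||
   PySem.Str.startswith nl "give" || PySem.Str.startswith nl "display")

def explicit_field_list_py (nlq : String) : List String :=
  let nl := PySem.Str.lower (if nlq = "" then "" else nlq)
  if pvGuard nl = false then []
  else
    let hits : List (Int × String) :=
      pvFieldSynonyms.foldl (fun hits kc =>
        let idx := PySem.Str.find nl kc.1
        if idx ≠ -1 then hits ++ [(idx, kc.2)] else hits) []
    let hits :=
      pvSpecialHints.foldl (fun hits kcc =>
        let idx := PySem.Str.find nl kcc.1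
        if idx ≠ -1 ∧ kcc.2.2.any (fun c => PySem.Str.isIn c nl) = true then
          hits ++ [(idx, kcc.2.1)]
        else hits) hits
    if hits = [] then []
    else
      (PySem.List.sorted hits (fun x => x.1) false).foldl
        (fun ordered p => if p.2 ∈ ordered then ordered else ordered ++ [p.2]) []

-- ===== PORT B =====
-- B's `for i in range(len(nl))` with `nl.startswith(k, i)` is ported by structural
-- recursion on the suffix nl[i:] (suffix = nl[i:], exact for 0 ≤ i ≤ len(nl), which
-- is the whole range of the loop); `nl.startswith(k, i)` is `startswith (nl[i:]) k`.
def pvScanStep (nl suffix : List Char) (ordered : List String) : List String :=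
  pvSpecialHints.foldl (fun ordered kcc =>
    if PySem.Chars.startswith suffix kcc.1.toList = true ∧
        kcc.2.2.any (fun c => PySem.Chars.isIn c.toList nl) = true ∧ kcc.2.1 ∉ ordered then
      ordered ++ [kcc.2.1]
    else ordered)
    (pvFieldSynonyms.foldl (fun ordered kc =>
      if PySem.Chars.startswith suffix kc.1.toList = true ∧ kc.2 ∉ ordered then
        ordered ++ [kc.2]
      else ordered) ordered)

def pvScan (nl : List Char) : List Char → List String → List String
  | [], ordered => ordered
  | c :: t, ordered => pvScan nl t (pvScanStep nl (c :: t) ordered)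

def explicit_field_list_py_alt (nlq : String) : List String :=
  let nl := PySem.Str.lower (if nlq = "" then "" else nlq)
  if pvGuard nl = false then []
  else pvScan nl.toList nl.toList []

-- ===== PRECONDITION & SPEC =====
def Spec_explicit_field_list_py (nlq : String) (out : List String) : Prop := out = explicit_field_list_py_alt nlq
instance (nlq : String) (out : List String) : Decidable (Spec_explicit_field_list_py nlq out) := by unfold Spec_explicit_field_list_py; infer_instance

-- ===== CLAIM (what is proved, stated in full; the proofs are below) =====
def Claim_equal_explicit_field_list_py : Prop := ∀ (nlq : String), Dom_explicit_field_list_py nlq → Spec_explicit_field_list_py nlq (explicit_field_list_py nlq)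

-- ===== LEMMAS AND PROOFS =====

-- The effective key table for text l: every synonym key, plus the special
-- "codes" key exactly when its context word occurs in l.
def pvKeys (l : List Char) : List (List Char × String) :=
  pvFieldSynonyms.map (fun kc => (kc.1.toList, kc.2)) ++
    (if PySem.Chars.isIn "product".toList l = true then [("codes".toList, "productCode")] else [])

def pvAllKeys : List (List Char × String) :=
  pvFieldSynonyms.map (fun kc => (kc.1.toList, kc.2)) ++ [("codes".toList, "productCode")]

-- the hit list A computes, one entry per matching key
def pvHits (l : List Char) : List (Int × String) :=
  ((pvFieldSynonyms.filter (fun kc => decide (PySem.Chars.find l kc.1.toList ≠ -1))).map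
      (fun kc => (PySem.Chars.find l kc.1.toList, kc.2))) ++
  (if PySem.Chars.find l "codes".toList ≠ -1 ∧ PySem.Chars.isIn "product".toList l = true then
    [(PySem.Chars.find l "codes".toList, "productCode")]
  else [])

-- columns whose key starts at the head of suffix s
def pvColsAt (l s : List Char) : List String :=
  (pvKeys l).filterMap (fun kc => if PySem.Chars.startswith s kc.1 = true then some kc.2 else none)

-- B's candidate stream, tagged with the position each candidate was seen at
def pvStream (l : List Char) : Int → List Char → List (Int × String)
  | _, [] => []
  | j, c :: t => (pvColsAt l (c :: t)).map (fun col => (j, col)) ++ pvStream l (j + 1) t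

-- the first-occurrence dedup fold both programs finish with
def pvFold (acc : List String) (ts : List (Int × String)) : List String :=
  ts.foldl (fun acc p => if p.2 ∈ acc then acc else acc ++ [p.2]) acc

-- indices at which column c's keys first match, and their minimum
def pvOcc (l : List Char) (c : String) : List Int :=
  (pvHits l).filterMap (fun p => if p.2 = c then some p.1 else none)

def pvKappa (l : List Char) (c : String) : Int :=
  (PySem.List.min? (pvOcc l c) (fun x => x)).getD 0

set_option maxHeartbeats 1000000 in
lemma pvAllKeys_prefix_col :
    ∀ kc ∈ pvAllKeys, ∀ kc' ∈ pvAllKeys, kc.1 <+: kc'.1 → kc.2 = kc'.2 := by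
  decide

lemma pvAllKeys_ne_nil : ∀ kc ∈ pvAllKeys, kc.1 ≠ [] := by decide

lemma pvKeys_subset (l : List Char) : ∀ kc ∈ pvKeys l, kc ∈ pvAllKeys := by
  intro kc hkc
  rcases List.mem_append.1 hkc with h | h
  · exact List.mem_append.2 (Or.inl h)
  · refine List.mem_append.2 (Or.inr ?_)
    split at h
    · exact h
    · simp at h

-- two distinct keys matching at the same position name the same column
lemma pvKeys_col_eq_of_prefix (l : List Char) {kc kc' : List Char × String} {s : List Char}
    (h : kc ∈ pvKeys l) (h' : kc' ∈ pvKeys l) (hp : kc.1 <+: s) (hp' : kc'.1 <+: s) :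
    kc.2 = kc'.2 := by
  rcases List.prefix_or_prefix_of_prefix hp hp' with hpp | hpp
  · exact pvAllKeys_prefix_col kc (pvKeys_subset l kc h) kc' (pvKeys_subset l kc' h') hpp
  · exact (pvAllKeys_prefix_col kc' (pvKeys_subset l kc' h') kc (pvKeys_subset l kc h) hpp).symm

lemma mem_pvHits (l : List Char) (p : Int × String) :
    p ∈ pvHits l ↔
      ∃ kc ∈ pvKeys l, PySem.Chars.find l kc.1 ≠ -1 ∧ p = (PySem.Chars.find l kc.1, kc.2) := by
  constructor
  · intro hp
    rcases List.mem_append.1 hp with h | h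
    · obtain ⟨kc, hkc, rfl⟩ := List.mem_map.1 h
      have hm := List.mem_filter.1 hkc
      refine ⟨(kc.1.toList, kc.2), List.mem_append.2 (Or.inl (List.mem_map.2 ⟨kc, hm.1, rfl⟩)), ?_, rfl⟩
      simpa using hm.2
    · split at h
      case isTrue hcond =>
        rw [List.mem_singleton] at h
        refine ⟨("codes".toList, "productCode"),
          List.mem_append.2 (Or.inr (by rw [if_pos hcond.2]; exact List.mem_singleton.2 rfl)),
          hcond.1, h⟩
      case isFalse => simp at h
  · rintro ⟨kc, hkc, hf, rfl⟩
    rcases List.mem_append.1 hkc with h | h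
    · obtain ⟨kc0, hkc0, rfl⟩ := List.mem_map.1 h
      exact List.mem_append.2 (Or.inl (List.mem_map.2 ⟨kc0, List.mem_filter.2 ⟨hkc0, by simpa using hf⟩, rfl⟩))
    · by_cases hctx : PySem.Chars.isIn "product".toList l = true
      · rw [if_pos hctx, List.mem_singleton] at h
        subst h
        exact List.mem_append.2 (Or.inr (by rw [if_pos ⟨hf, hctx⟩]; exact List.mem_singleton.2 rfl))
      · rw [if_neg hctx] at h
        simp at h

lemma mem_pvColsAt (l s : List Char) (c : String) :
    c ∈ pvColsAt l s ↔ ∃ kc ∈ pvKeys l, kc.1 <+: s ∧ kc.2 = c := by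
  simp only [pvColsAt, List.mem_filterMap]
  constructor
  · rintro ⟨kc, hkc, hif⟩
    by_cases hsw : PySem.Chars.startswith s kc.1 = true
    · rw [if_pos hsw, Option.some.injEq] at hif
      exact ⟨kc, hkc, (PySem.Chars.startswith_iff s kc.1).1 hsw, hif⟩
    · simp [hsw] at hif
  · rintro ⟨kc, hkc, hpre, hc⟩
    exact ⟨kc, hkc, by rw [if_pos ((PySem.Chars.startswith_iff s kc.1).2 hpre)]; exact congrArg some hc⟩

lemma mem_pvStream (l : List Char) :
    ∀ (s : List Char) (j : Int) (p : Int × String),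
      p ∈ pvStream l j s ↔ ∃ d : ℕ, d < s.length ∧ p.1 = j + d ∧ p.2 ∈ pvColsAt l (s.drop d) := by
  intro s
  induction s with
  | nil => intro j p; simp [pvStream]
  | cons c t ih =>
    intro j p
    simp only [pvStream, List.mem_append, List.mem_map, ih]
    constructor
    · rintro (⟨col, hcol, rfl⟩ | ⟨d, hd, h1, h2⟩)
      · exact ⟨0, by simp, by simp, by simpa using hcol⟩
      · exact ⟨d + 1, by simpa using hd, by omega, by simpa using h2⟩
    · rintro ⟨d, hd, h1, h2⟩
      cases d with
      | zero =>
        left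
        refine ⟨p.2, by simpa using h2, ?_⟩
        have : p.1 = j := by omega
        rw [← this]
      | succ d =>
        right
        exact ⟨d, by simpa using hd, by omega, by simpa using h2⟩

lemma pvStream_ge (l : List Char) :
    ∀ (s : List Char) (j : Int) (p : Int × String), p ∈ pvStream l j s → j ≤ p.1 := by
  intro s j p hp
  obtain ⟨d, _, h1, _⟩ := (mem_pvStream l s j p).1 hp
  omega

lemma pvStream_pairwise (l : List Char) :
    ∀ (s : List Char) (j : Int), (pvStream l j s).Pairwise (fun p q => p.1 ≤ q.1) := by
  intro s
  induction s with
  | nil => intro j; simp [pvStream]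
  | cons c t ih =>
    intro j
    simp only [pvStream]
    rw [List.pairwise_append]
    refine ⟨?_, ih (j + 1), ?_⟩
    · rw [List.pairwise_map]
      exact List.pairwise_iff_forall_sublist.2 (fun {a b} _ => le_refl j)
    · intro x hx y hy
      rcases List.mem_map.1 hx with ⟨col, _, rfl⟩
      have := pvStream_ge l t (j + 1) y hy
      simp only
      omega

-- a key matching the head of l.drop d means find ≤ d (find is the first match)
lemma pvFind_le_of_prefix_drop (l k : List Char) (hk : k ≠ []) (d : ℕ) (h : k <+: l.drop d) :
    PySem.Chars.find l k ≠ -1 ∧ PySem.Chars.find l k ≤ (d : Int) := by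
  have hinf : k <:+: l := h.isInfix.trans (List.drop_suffix d l).isInfix
  have hne : PySem.Chars.find l k ≠ -1 := (PySem.Chars.find_ne_neg_one_iff l k).2 hinf
  have hge : 0 ≤ PySem.Chars.find l k := by
    have := PySem.Chars.neg_one_le_find l k
    omega
  refine ⟨hne, ?_⟩
  by_contra hlt
  push_neg at hlt
  have hdlt : d < (PySem.Chars.find l k).toNat := by omega
  exact (PySem.Chars.find_spec hge).2 d hdlt h

lemma pvPrefix_drop_find (l k : List Char) (h : PySem.Chars.find l k ≠ -1) :
    k <+: l.drop (PySem.Chars.find l k).toNat := by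
  have hge : 0 ≤ PySem.Chars.find l k := by
    have := PySem.Chars.neg_one_le_find l k
    omega
  exact (PySem.Chars.find_spec hge).1

lemma mem_pvOcc (l : List Char) (c : String) (i : Int) :
    i ∈ pvOcc l c ↔
      ∃ kc ∈ pvKeys l, kc.2 = c ∧ PySem.Chars.find l kc.1 ≠ -1 ∧ i = PySem.Chars.find l kc.1 := by
  simp only [pvOcc, List.mem_filterMap]
  constructor
  · rintro ⟨p, hp, hif⟩
    by_cases hc : p.2 = c
    · rw [if_pos hc, Option.some.injEq] at hif
      obtain ⟨kc, hkc, hf, he⟩ := (mem_pvHits l p).1 hp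
      refine ⟨kc, hkc, by rw [he] at hc; exact hc, hf, ?_⟩
      rw [he] at hif
      exact hif.symm
    · simp [hc] at hif
  · rintro ⟨kc, hkc, hc, hf, rfl⟩
    refine ⟨(PySem.Chars.find l kc.1, kc.2), (mem_pvHits l _).2 ⟨kc, hkc, hf, rfl⟩, ?_⟩
    rw [if_pos hc]

lemma pvKappa_spec (l : List Char) (c : String)
    (hne : ∃ kc ∈ pvKeys l, kc.2 = c ∧ PySem.Chars.find l kc.1 ≠ -1) :
    (∃ kc ∈ pvKeys l, kc.2 = c ∧ PySem.Chars.find l kc.1 ≠ -1 ∧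
        PySem.Chars.find l kc.1 = pvKappa l c) ∧
    (∀ kc ∈ pvKeys l, kc.2 = c → PySem.Chars.find l kc.1 ≠ -1 →
        pvKappa l c ≤ PySem.Chars.find l kc.1) := by
  obtain ⟨kc0, hkc0, hc0, hf0⟩ := hne
  have hocc : PySem.Chars.find l kc0.1 ∈ pvOcc l c :=
    (mem_pvOcc l c _).2 ⟨kc0, hkc0, hc0, hf0, rfl⟩
  have hocc_ne : pvOcc l c ≠ [] := List.ne_nil_of_mem hocc
  obtain ⟨m, hm⟩ : ∃ m, PySem.List.min? (pvOcc l c) (fun x => x) = some m := by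
    cases hmin : PySem.List.min? (pvOcc l c) (fun x => x) with
    | none => exact absurd ((PySem.List.min?_eq_none_iff _ _).1 hmin) hocc_ne
    | some m => exact ⟨m, rfl⟩
  have hk : pvKappa l c = m := by simp [pvKappa, hm]
  constructor
  · obtain ⟨kc, hkc, hc, hf, he⟩ := (mem_pvOcc l c m).1 (PySem.List.min?_mem hm)
    exact ⟨kc, hkc, hc, hf, by rw [hk, he]⟩
  · intro kc hkc hc hf
    rw [hk]
    exact PySem.List.min?_isMin hm _ ((mem_pvOcc l c _).2 ⟨kc, hkc, hc, hf, rfl⟩)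

lemma pvFold_mem (ts : List (Int × String)) :
    ∀ acc x, x ∈ pvFold acc ts ↔ x ∈ acc ∨ ∃ p ∈ ts, p.2 = x := by
  induction ts with
  | nil => simp [pvFold]
  | cons h t ih =>
    intro acc x
    simp only [pvFold, List.foldl_cons] at *
    by_cases hm : h.2 ∈ acc
    · rw [if_pos hm, ih]
      constructor
      · rintro (hx | ⟨p, hp, he⟩)
        · exact Or.inl hx
        · exact Or.inr ⟨p, List.mem_cons_of_mem _ hp, he⟩
      · rintro (hx | ⟨p, hp, he⟩)
        · exact Or.inl hx
        · rcases List.mem_cons.1 hp with rfl | hp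
          · exact Or.inl (he ▸ hm)
          · exact Or.inr ⟨p, hp, he⟩
    · rw [if_neg hm, ih]
      constructor
      · rintro (hx | ⟨p, hp, he⟩)
        · rcases List.mem_append.1 hx with hx | hx
          · exact Or.inl hx
          · exact Or.inr ⟨h, List.mem_cons_self .., by simpa using (List.mem_singleton.1 hx).symm⟩
        · exact Or.inr ⟨p, List.mem_cons_of_mem _ hp, he⟩
      · rintro (hx | ⟨p, hp, he⟩)
        · exact Or.inl (List.mem_append.2 (Or.inl hx))
        · rcases List.mem_cons.1 hp with rfl | hp
          · exact Or.inl (by simp [he])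
          · exact Or.inr ⟨p, hp, he⟩

lemma pvFold_nodup (ts : List (Int × String)) :
    ∀ acc, acc.Nodup → (pvFold acc ts).Nodup := by
  induction ts with
  | nil => simp [pvFold]
  | cons h t ih =>
    intro acc hacc
    simp only [pvFold, List.foldl_cons]
    by_cases hm : h.2 ∈ acc
    · rw [if_pos hm]; exact ih acc hacc
    · rw [if_neg hm]
      refine ih _ ?_
      simp only [List.nodup_append, List.nodup_singleton, true_and, hacc]
      intro a ha b hb
      rw [List.mem_singleton] at hb
      subst hb
      exact fun hab => hm (hab ▸ ha)

lemma pvFold_pairwise {κ : String → Int} :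
    ∀ (ts : List (Int × String)) (acc : List String),
    ts.Pairwise (fun p q => p.1 ≤ q.1) →
    (∀ p ∈ ts, κ p.2 ≤ p.1) →
    (∀ p ∈ ts, ∀ q ∈ ts, p.1 = q.1 → p.2 = q.2) →
    (∀ p ∈ ts, p.2 ∉ acc → ∃ q ∈ ts, q.2 = p.2 ∧ q.1 = κ p.2) →
    acc.Pairwise (fun a b => κ a < κ b) →
    (∀ x ∈ acc, ∀ p ∈ ts, κ x ≤ p.1 ∧ (κ x = p.1 → p.2 = x)) →
    (pvFold acc ts).Pairwise (fun a b => κ a < κ b) := by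
  intro ts
  induction ts with
  | nil => intro acc _ _ _ _ hacc _; simpa [pvFold] using hacc
  | cons h t ih =>
    intro acc hord hL2 hL3 hatt haccpw haccts
    rw [List.pairwise_cons] at hord
    simp only [pvFold, List.foldl_cons]
    by_cases hm : h.2 ∈ acc
    · rw [if_pos hm]
      apply ih acc hord.2
      · exact fun p hp => hL2 p (List.mem_cons_of_mem _ hp)
      · exact fun p hp q hq => hL3 p (List.mem_cons_of_mem _ hp) q (List.mem_cons_of_mem _ hq)
      · intro p hp hpm
        obtain ⟨q, hq, hq2, hq1⟩ := hatt p (List.mem_cons_of_mem _ hp) hpm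
        rcases List.mem_cons.1 hq with rfl | hq'
        · exact absurd (hq2 ▸ hm) hpm
        · exact ⟨q, hq', hq2, hq1⟩
      · exact haccpw
      · exact fun x hx p hp => haccts x hx p (List.mem_cons_of_mem _ hp)
    · rw [if_neg hm]
      have hkle : κ h.2 ≤ h.1 := hL2 h (List.mem_cons_self ..)
      have hkeq : κ h.2 = h.1 := by
        obtain ⟨q, hq, hq2, hq1⟩ := hatt h (List.mem_cons_self ..) hm
        rcases List.mem_cons.1 hq with rfl | hq'
        · omega
        · have := hord.1 q hq'
          omega
      have hcross : ∀ x ∈ acc, κ x < κ h.2 := by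
        intro x hx
        obtain ⟨hle, himp⟩ := haccts x hx h (List.mem_cons_self ..)
        rcases lt_or_eq_of_le hle with hlt | heq2
        · omega
        · exact absurd (himp heq2 ▸ hx) hm
      apply ih (acc ++ [h.2]) hord.2
      · exact fun p hp => hL2 p (List.mem_cons_of_mem _ hp)
      · exact fun p hp q hq => hL3 p (List.mem_cons_of_mem _ hp) q (List.mem_cons_of_mem _ hq)
      · intro p hp hpm
        rw [List.mem_append, List.mem_singleton] at hpm
        push_neg at hpm
        obtain ⟨q, hq, hq2, hq1⟩ := hatt p (List.mem_cons_of_mem _ hp) hpm.1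
        rcases List.mem_cons.1 hq with rfl | hq'
        · exact absurd (hq2.symm) hpm.2
        · exact ⟨q, hq', hq2, hq1⟩
      · rw [List.pairwise_append]
        refine ⟨haccpw, List.pairwise_singleton _ _, ?_⟩
        intro x hx y hy
        rw [List.mem_singleton] at hy
        subst hy
        exact hcross x hx
      · intro x hx p hp
        rcases List.mem_append.1 hx with hx' | hx'
        · exact haccts x hx' p (List.mem_cons_of_mem _ hp)
        · rw [List.mem_singleton] at hx'
          subst hx'
          constructor
          · have := hord.1 p hp
            omega
          · intro heq
            exact hL3 p (List.mem_cons_of_mem _ hp) h (List.mem_cons_self ..) (by omega)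

lemma pvFoldGuard {β : Type} (P : β → Prop) [DecidablePred P] (f : β → String) :
    ∀ (ks : List β) (acc : List String),
    ks.foldl (fun acc kc => if P kc ∧ f kc ∉ acc then acc ++ [f kc] else acc) acc
      = (ks.filterMap (fun kc => if P kc then some (f kc) else none)).foldl
          (fun acc c => if c ∈ acc then acc else acc ++ [c]) acc := by
  intro ks
  induction ks with
  | nil => intro acc; simp
  | cons kc t ih =>
    intro acc
    rw [List.foldl_cons, List.filterMap_cons]
    by_cases hP : P kc
    · have h1 : (if P kc ∧ f kc ∉ acc then acc ++ [f kc] else acc)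
          = if f kc ∈ acc then acc else acc ++ [f kc] := by
        by_cases hm : f kc ∈ acc
        · rw [if_neg (fun h => h.2 hm), if_pos hm]
        · rw [if_pos ⟨hP, hm⟩, if_neg hm]
      rw [if_pos hP, List.foldl_cons, h1]
      exact ih _
    · rw [if_neg (fun h => hP h.1), if_neg hP]
      exact ih acc

lemma pvSpecialStep (l s : List Char) (R : List String) :
    pvSpecialHints.foldl (fun ordered kcc =>
      if PySem.Chars.startswith s kcc.1.toList = true ∧
          kcc.2.2.any (fun c => PySem.Chars.isIn c.toList l) = true ∧ kcc.2.1 ∉ ordered then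
        ordered ++ [kcc.2.1]
      else ordered) R
    = ((if PySem.Chars.isIn "product".toList l = true then [("codes".toList, "productCode")] else []).filterMap
        (fun kc => if PySem.Chars.startswith s kc.1 = true then some kc.2 else none)).foldl
        (fun acc c => if c ∈ acc then acc else acc ++ [c]) R := by
  simp only [pvSpecialHints, List.foldl_cons, List.foldl_nil, List.any_cons, List.any_nil,
    Bool.or_false]
  by_cases hctx : PySem.Chars.isIn "product".toList l = true
  · rw [if_pos hctx]
    by_cases hsw : PySem.Chars.startswith s "codes".toList = true
    · by_cases hm : "productCode" ∈ R
      · simp_all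
      · simp_all
    · simp_all
  · rw [if_neg hctx]
    simp only [List.filterMap_nil, List.foldl_nil]
    rw [if_neg (by intro h; exact hctx h.2.1)]

lemma pvScanStep_eq (l s : List Char) (acc : List String) (j : Int) :
    pvScanStep l s acc = pvFold acc ((pvColsAt l s).map (fun col => (j, col))) := by
  unfold pvScanStep pvFold pvColsAt pvKeys
  rw [List.foldl_map]
  simp only [List.filterMap_append, List.filterMap_map, List.foldl_append, Function.comp_def]
  rw [pvFoldGuard (fun kc : String × String => PySem.Chars.startswith s kc.1.toList = true)
      (fun kc : String × String => kc.2) pvFieldSynonyms acc]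
  exact pvSpecialStep l s _

lemma pvScan_eq (l : List Char) :
    ∀ (s : List Char) (acc : List String) (j : Int),
      pvScan l s acc = pvFold acc (pvStream l j s) := by
  intro s
  induction s with
  | nil => intro acc j; simp [pvScan, pvStream, pvFold]
  | cons c t ih =>
    intro acc j
    show pvScan l t (pvScanStep l (c :: t) acc) = _
    rw [pvScanStep_eq l (c :: t) acc j, ih _ (j + 1)]
    simp [pvStream, pvFold, List.foldl_append]

lemma pvMain (l : List Char) :
    pvFold [] (PySem.List.sorted (pvHits l) (fun x => x.1) false)
      = pvFold [] (pvStream l 0 l) := by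
  have hfind0 : ∀ k : List Char, PySem.Chars.find l k ≠ -1 → 0 ≤ PySem.Chars.find l k := by
    intro k hf
    have := PySem.Chars.neg_one_le_find l k
    omega
  have hL2A : ∀ p ∈ PySem.List.sorted (pvHits l) (fun x => x.1) false, pvKappa l p.2 ≤ p.1 := by
    intro p hp
    obtain ⟨kc, hkc, hf, rfl⟩ := (mem_pvHits l p).1 ((PySem.List.mem_sorted _ _ _ _).1 hp)
    exact (pvKappa_spec l kc.2 ⟨kc, hkc, rfl, hf⟩).2 kc hkc rfl hf
  have hL3A : ∀ p ∈ PySem.List.sorted (pvHits l) (fun x => x.1) false,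
      ∀ q ∈ PySem.List.sorted (pvHits l) (fun x => x.1) false, p.1 = q.1 → p.2 = q.2 := by
    intro p hp q hq heq
    obtain ⟨kc, hkc, hf, rfl⟩ := (mem_pvHits l p).1 ((PySem.List.mem_sorted _ _ _ _).1 hp)
    obtain ⟨kc', hkc', hf', rfl⟩ := (mem_pvHits l q).1 ((PySem.List.mem_sorted _ _ _ _).1 hq)
    have hpre := pvPrefix_drop_find l kc.1 hf
    have hpre' := pvPrefix_drop_find l kc'.1 hf'
    simp only at heq ⊢
    rw [heq] at hpre
    exact pvKeys_col_eq_of_prefix l hkc hkc' hpre hpre'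
  have hattA : ∀ p ∈ PySem.List.sorted (pvHits l) (fun x => x.1) false,
      p.2 ∉ ([] : List String) →
      ∃ q ∈ PySem.List.sorted (pvHits l) (fun x => x.1) false, q.2 = p.2 ∧ q.1 = pvKappa l p.2 := by
    intro p hp _
    obtain ⟨kc, hkc, hf, rfl⟩ := (mem_pvHits l p).1 ((PySem.List.mem_sorted _ _ _ _).1 hp)
    obtain ⟨⟨kc0, hkc0, hc0, hf0, he0⟩, _⟩ := pvKappa_spec l kc.2 ⟨kc, hkc, rfl, hf⟩
    exact ⟨(PySem.Chars.find l kc0.1, kc0.2),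
      (PySem.List.mem_sorted _ _ _ _).2 ((mem_pvHits l _).2 ⟨kc0, hkc0, hf0, rfl⟩),
      hc0, by simpa [hc0] using he0⟩
  have hL2B : ∀ p ∈ pvStream l 0 l, pvKappa l p.2 ≤ p.1 := by
    intro p hp
    obtain ⟨d, hd, h1, h2⟩ := (mem_pvStream l l 0 p).1 hp
    obtain ⟨kc, hkc, hpre, hc⟩ := (mem_pvColsAt l _ _).1 h2
    obtain ⟨hf, hle⟩ := pvFind_le_of_prefix_drop l kc.1 (pvAllKeys_ne_nil kc (pvKeys_subset l kc hkc)) d hpre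
    have := (pvKappa_spec l p.2 ⟨kc, hkc, hc, hf⟩).2 kc hkc hc hf
    omega
  have hL3B : ∀ p ∈ pvStream l 0 l, ∀ q ∈ pvStream l 0 l, p.1 = q.1 → p.2 = q.2 := by
    intro p hp q hq heq
    obtain ⟨d, hd, h1, h2⟩ := (mem_pvStream l l 0 p).1 hp
    obtain ⟨d', hd', h1', h2'⟩ := (mem_pvStream l l 0 q).1 hq
    have hdd : d = d' := by omega
    subst hdd
    obtain ⟨kc, hkc, hpre, hc⟩ := (mem_pvColsAt l _ _).1 h2
    obtain ⟨kc', hkc', hpre', hc'⟩ := (mem_pvColsAt l _ _).1 h2'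
    rw [← hc, ← hc']
    exact pvKeys_col_eq_of_prefix l hkc hkc' hpre hpre'
  have hattB : ∀ p ∈ pvStream l 0 l, p.2 ∉ ([] : List String) →
      ∃ q ∈ pvStream l 0 l, q.2 = p.2 ∧ q.1 = pvKappa l p.2 := by
    intro p hp _
    obtain ⟨d, hd, h1, h2⟩ := (mem_pvStream l l 0 p).1 hp
    obtain ⟨kc, hkc, hpre, hc⟩ := (mem_pvColsAt l _ _).1 h2
    have hk := pvAllKeys_ne_nil kc (pvKeys_subset l kc hkc)
    obtain ⟨hf, _⟩ := pvFind_le_of_prefix_drop l kc.1 hk d hpre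
    obtain ⟨⟨kc0, hkc0, hc0, hf0, he0⟩, _⟩ := pvKappa_spec l p.2 ⟨kc, hkc, hc, hf⟩
    have hk0 := pvAllKeys_ne_nil kc0 (pvKeys_subset l kc0 hkc0)
    have h00 : 0 ≤ PySem.Chars.find l kc0.1 := hfind0 _ hf0
    have hpre0 := pvPrefix_drop_find l kc0.1 hf0
    have hlt : (PySem.Chars.find l kc0.1).toNat < l.length := by
      by_contra hh
      push_neg at hh
      rw [List.drop_eq_nil_iff.2 hh] at hpre0
      exact hk0 (List.prefix_nil.1 hpre0)
    refine ⟨(PySem.Chars.find l kc0.1, p.2), (mem_pvStream l l 0 _).2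
      ⟨(PySem.Chars.find l kc0.1).toNat, hlt, by simp only; omega,
        (mem_pvColsAt l _ _).2 ⟨kc0, hkc0, hpre0, hc0⟩⟩, rfl, by simpa using he0⟩
  have pwA := pvFold_pairwise (κ := pvKappa l) (PySem.List.sorted (pvHits l) (fun x => x.1) false) []
    (PySem.List.sorted_pairwise (pvHits l) (fun x => x.1)) hL2A hL3A hattA List.Pairwise.nil
    (fun x hx => absurd hx List.not_mem_nil)
  have pwB := pvFold_pairwise (κ := pvKappa l) (pvStream l 0 l) []
    (pvStream_pairwise l l 0) hL2B hL3B hattB List.Pairwise.nil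
    (fun x hx => absurd hx List.not_mem_nil)
  have hnodA := pvFold_nodup (PySem.List.sorted (pvHits l) (fun x => x.1) false) [] List.nodup_nil
  have hnodB := pvFold_nodup (pvStream l 0 l) [] List.nodup_nil
  have hmemEq : ∀ a, a ∈ pvFold [] (pvStream l 0 l)
      ↔ a ∈ pvFold [] (PySem.List.sorted (pvHits l) (fun x => x.1) false) := by
    intro a
    rw [pvFold_mem, pvFold_mem]
    simp only [List.not_mem_nil, false_or]
    constructor
    · rintro ⟨p, hp, rfl⟩
      obtain ⟨d, hd, h1, h2⟩ := (mem_pvStream l l 0 p).1 hp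
      obtain ⟨kc, hkc, hpre, hc⟩ := (mem_pvColsAt l _ _).1 h2
      have hk := pvAllKeys_ne_nil kc (pvKeys_subset l kc hkc)
      obtain ⟨hf, _⟩ := pvFind_le_of_prefix_drop l kc.1 hk d hpre
      exact ⟨(PySem.Chars.find l kc.1, kc.2),
        (PySem.List.mem_sorted _ _ _ _).2 ((mem_pvHits l _).2 ⟨kc, hkc, hf, rfl⟩), hc⟩
    · rintro ⟨p, hp, rfl⟩
      obtain ⟨kc, hkc, hf, rfl⟩ := (mem_pvHits l p).1 ((PySem.List.mem_sorted _ _ _ _).1 hp)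
      have hk := pvAllKeys_ne_nil kc (pvKeys_subset l kc hkc)
      have h0 : 0 ≤ PySem.Chars.find l kc.1 := hfind0 _ hf
      have hpre := pvPrefix_drop_find l kc.1 hf
      have hlt : (PySem.Chars.find l kc.1).toNat < l.length := by
        by_contra hh
        push_neg at hh
        rw [List.drop_eq_nil_iff.2 hh] at hpre
        exact hk (List.prefix_nil.1 hpre)
      exact ⟨(PySem.Chars.find l kc.1, kc.2), (mem_pvStream l l 0 _).2
        ⟨(PySem.Chars.find l kc.1).toNat, hlt, by simp only; omega,
          (mem_pvColsAt l _ _).2 ⟨kc, hkc, hpre, rfl⟩⟩, rfl⟩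
  have hperm := (List.perm_ext_iff_of_nodup hnodB hnodA).2 hmemEq
  have e1 := PySem.List.sorted_eq_of_perm_of_pairwise_lt
    (pvFold [] (PySem.List.sorted (pvHits l) (fun x => x.1) false))
    (pvFold [] (pvStream l 0 l)) (pvKappa l) hperm pwB
  have e2 := PySem.List.sorted_eq_of_perm_of_pairwise_lt
    (pvFold [] (PySem.List.sorted (pvHits l) (fun x => x.1) false))
    (pvFold [] (PySem.List.sorted (pvHits l) (fun x => x.1) false)) (pvKappa l)
    (List.Perm.refl _) pwA
  exact e2.symm.trans e1

-- ===== VERDICT (by name: the statement is the Claim_ definition above) =====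
lemma pvIteAppend {c : Prop} [Decidable c] (X : List (Int × String)) (x : Int × String) :
    (if c then X ++ [x] else X) = X ++ (if c then [x] else []) := by
  split_ifs <;> simp

theorem explicit_field_list_py_spec : Claim_equal_explicit_field_list_py := by
  intro nlq _
  unfold Spec_explicit_field_list_py
  show explicit_field_list_py nlq = explicit_field_list_py_alt nlq
  by_cases hg : pvGuard (PySem.Str.lower (if nlq = "" then "" else nlq)) = false
  · simp only [explicit_field_list_py, explicit_field_list_py_alt, if_pos hg]
  · simp only [explicit_field_list_py, explicit_field_list_py_alt, if_neg hg]
    rw [pvScan_eq _ _ _ 0]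
    rw [PySem.List.foldl_append_ite
      (fun kc : String × String => PySem.Str.find (PySem.Str.lower (if nlq = "" then "" else nlq)) kc.1 ≠ -1)
      (fun kc : String × String => (PySem.Str.find (PySem.Str.lower (if nlq = "" then "" else nlq)) kc.1, kc.2))
      pvFieldSynonyms []]
    simp only [pvSpecialHints, List.foldl_cons, List.foldl_nil, List.nil_append,
      List.any_cons, List.any_nil, Bool.or_false, PySem.Str.find_eq, PySem.Str.isIn_eq,
      pvIteAppend]
    have hh : ∀ hits : List (Int × String), hits = pvHits (PySem.Str.lower (if nlq = "" then "" else nlq)).toList →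
        (if hits = [] then [] else
          (PySem.List.sorted hits (fun x => x.1) false).foldl
            (fun ordered p => if p.2 ∈ ordered then ordered else ordered ++ [p.2]) [])
        = pvFold [] (pvStream (PySem.Str.lower (if nlq = "" then "" else nlq)).toList 0
            (PySem.Str.lower (if nlq = "" then "" else nlq)).toList) := by
      intro hits hhits
      subst hhits
      by_cases hnil : pvHits (PySem.Str.lower (if nlq = "" then "" else nlq)).toList = []
      · rw [if_pos hnil]
        have hm := pvMain (PySem.Str.lower (if nlq = "" then "" else nlq)).toList
        rw [hnil] at hm
        have hs : PySem.List.sorted ([] : List (Int × String)) (fun x => x.1) false = [] := rfl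
        rw [hs] at hm
        exact hm
      · rw [if_neg hnil]
        exact pvMain (PySem.Str.lower (if nlq = "" then "" else nlq)).toList
    exact hh _ rfl
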